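-- pv_equiv track=rewrite | github.com/DoggoofCode/YT_Comment_Scraper | main.py | ReadCommand
-- ===== SOURCE A (Python) =====
-- def ReadCommand(command):
--     switch = 1
--
--     order = ''
--     state = ''
--
--     for letters in command:
--         if letters == '/':
--             switch = 2
--         if not letters == '/':
--             if switch == 1:
--                 order = order + str(letters)
--             else:
--                 state = state + str(letters)
--
--     return order, state
-- ===== SOURCE B (Python) =====
-- def ReadCommand(command):
--     parts = command.split('/')
--     return parts[0], ''.join(parts[1:])
-- ===== Notes on version B (the rewrite author's own statement) =====
-- stated objective: simpler
-- what changed: Replaces A's character-by-character switch state machine with a single split on the slash separator: the first part is the order and the remaining parts joined give the state, which drops every later slash exactly as A does.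
import Mathlib
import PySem

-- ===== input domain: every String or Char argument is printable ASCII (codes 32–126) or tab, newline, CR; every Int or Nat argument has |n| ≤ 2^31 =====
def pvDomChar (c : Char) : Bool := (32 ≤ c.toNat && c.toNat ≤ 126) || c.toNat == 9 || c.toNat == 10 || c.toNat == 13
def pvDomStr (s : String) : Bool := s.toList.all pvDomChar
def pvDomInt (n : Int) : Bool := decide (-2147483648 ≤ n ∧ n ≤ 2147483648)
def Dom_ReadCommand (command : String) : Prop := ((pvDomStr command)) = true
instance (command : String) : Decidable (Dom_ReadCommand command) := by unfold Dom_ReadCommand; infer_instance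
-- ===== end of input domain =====

-- B replaces A's character-by-character state machine by a single split('/') followed by
-- a join of the tail parts (simpler); return value only, no side effects in either program.

-- ===== PORT A =====
-- one loop step: 'if letters == '/': switch = 2' then 'if not letters == '/': …'
def ReadCommandStep (st : Int × List Char × List Char) (c : Char) : Int × List Char × List Char :=
  let sw := if c = '/' then 2 else st.1
  if ¬ c = '/' then
    if sw = 1 then (sw, st.2.1 ++ [c], st.2.2) else (sw, st.2.1, st.2.2 ++ [c])
  else (sw, st.2.1, st.2.2)

def ReadCommand (command : String) : String × String :=
  let fin := command.toList.foldl ReadCommandStep (1, [], [])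
  (String.ofList fin.2.1, String.ofList fin.2.2)

-- ===== PORT B =====
-- parts = command.split('/'); return parts[0], ''.join(parts[1:])
-- (split('/') always returns a nonempty list, so parts[0] is its head)
def ReadCommand_alt (command : String) : String × String :=
  let parts := PySem.Chars.splitOn command.toList ['/']
  (String.ofList (parts.headD []),
   String.ofList (PySem.Chars.join [] (PySem.List.slice parts (some 1) none)))

-- ===== PRECONDITION & SPEC =====
def Spec_ReadCommand (command : String) (out : String × String) : Prop := out = ReadCommand_alt command
instance (command : String) (out : String × String) : Decidable (Spec_ReadCommand command out) := by unfold Spec_ReadCommand; infer_instance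

-- ===== CLAIM (what is proved, stated in full; the proofs are below) =====
def Claim_equal_ReadCommand : Prop := ∀ (command : String), Dom_ReadCommand command → Spec_ReadCommand command (ReadCommand command)

-- ===== LEMMAS AND PROOFS =====

-- simple recursive model of split on a single-character separator
def splitSimple (cur : List Char) : List Char → List (List Char)
  | [] => [cur]
  | c :: r => if c = '/' then cur :: splitSimple [] r else splitSimple (cur ++ [c]) r

lemma splitOn_go_eq (fuel : Nat) : ∀ (l cur : List Char) (acc : List (List Char)), l.length ≤ fuel →
    PySem.Chars.splitOn.go ['/'] fuel l cur acc = acc.reverse ++ splitSimple cur.reverse l := by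
  induction fuel with
  | zero =>
    intro l cur acc h
    have : l = [] := List.eq_nil_of_length_eq_zero (Nat.le_zero.mp h)
    subst this
    simp [PySem.Chars.splitOn.go, splitSimple]
  | succ n ih =>
    intro l cur acc h
    cases l with
    | nil => simp [PySem.Chars.splitOn.go, splitSimple]
    | cons c rest =>
      simp only [PySem.Chars.splitOn.go]
      by_cases hc : c = '/'
      · subst hc
        have hp : ['/'].isPrefixOf ('/' :: rest) = true := by simp [List.isPrefixOf]
        rw [if_pos hp]
        simp only [List.length, List.drop]
        rw [ih rest [] (cur.reverse :: acc) (by simpa using Nat.le_of_succ_le_succ h)]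
        simp [splitSimple]
      · have hp : ['/'].isPrefixOf (c :: rest) = false := by
          simp [List.isPrefixOf]
          exact Ne.symm hc
        rw [if_neg (by simp [hp])]
        rw [ih rest (c :: cur) acc (by simpa using Nat.le_of_succ_le_succ h)]
        simp [splitSimple, hc]

lemma splitOn_eq (cs : List Char) :
    PySem.Chars.splitOn cs ['/'] = splitSimple [] cs := by
  unfold PySem.Chars.splitOn
  rw [splitOn_go_eq (cs.length + 1) cs [] [] (by omega)]
  simp

lemma splitSimple_flatten (l : List Char) : ∀ cur,
    (splitSimple cur l).flatten = cur ++ l.filter (· ≠ '/') := by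
  induction l with
  | nil => intro cur; simp [splitSimple]
  | cons c r ih =>
    intro cur
    by_cases hc : c = '/'
    · subst hc; simp [splitSimple, ih]
    · simp [splitSimple, hc, ih]

lemma splitSimple_head_tail (l : List Char) : ∀ cur,
    (splitSimple cur l).headD [] = cur ++ l.takeWhile (· ≠ '/') ∧
    ((splitSimple cur l).drop 1).flatten = (l.dropWhile (· ≠ '/')).filter (· ≠ '/') := by
  induction l with
  | nil => intro cur; simp [splitSimple]
  | cons c r ih =>
    intro cur
    by_cases hc : c = '/'
    · subst hc
      simp [splitSimple, List.takeWhile, List.dropWhile, splitSimple_flatten]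
    · have := ih (cur ++ [c])
      simp only [splitSimple, if_neg hc]
      constructor
      · rw [this.1]; simp [List.takeWhile, hc]
      · rw [this.2]; simp [List.dropWhile, hc]

-- A's loop after the first slash: only state grows, by the non-slash characters
lemma foldl_step_two (l : List Char) : ∀ o s,
    l.foldl ReadCommandStep (2, o, s) = (2, o, s ++ l.filter (· ≠ '/')) := by
  induction l with
  | nil => intro o s; simp
  | cons c r ih =>
    intro o s
    by_cases hc : c = '/'
    · subst hc; simp [ReadCommandStep, ih]
    · simp [ReadCommandStep, hc, ih]

-- A's loop before any slash
lemma foldl_step_one (l : List Char) : ∀ o s,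
    l.foldl ReadCommandStep (1, o, s) =
      let fin := l.foldl ReadCommandStep (1, o, s)
      (fin.1, o ++ l.takeWhile (· ≠ '/'), s ++ (l.dropWhile (· ≠ '/')).filter (· ≠ '/')) := by
  induction l with
  | nil => intro o s; simp
  | cons c r ih =>
    intro o s
    by_cases hc : c = '/'
    · subst hc
      simp only [List.foldl_cons]
      have h2 : ReadCommandStep (1, o, s) '/' = (2, o, s) := by simp [ReadCommandStep]
      rw [h2, foldl_step_two]
      simp [List.takeWhile, List.dropWhile]
    · simp only [List.foldl_cons]
      have h1 : ReadCommandStep (1, o, s) c = (1, o ++ [c], s) := by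
        simp [ReadCommandStep, hc]
      rw [h1, ih (o ++ [c]) s, ih (o ++ [c]) s]
      simp [List.takeWhile, List.dropWhile, hc]

lemma flatten_intersperse_aux (l : List (List Char)) :
    (List.intersperse [] l).flatten = l.flatten := by
  induction l with
  | nil => rfl
  | cons a t ih =>
    cases t with
    | nil => rfl
    | cons b t2 => simpa [List.intersperse] using ih

-- ===== VERDICT (by name: the statement is the Claim_ definition above) =====
theorem ReadCommand_spec : Claim_equal_ReadCommand := by
  intro command _
  unfold Spec_ReadCommand ReadCommand ReadCommand_alt
  simp only [splitOn_eq, PySem.List.slice_from_one]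
  have hA := foldl_step_one command.toList [] []
  have hB := splitSimple_head_tail command.toList []
  simp only [List.nil_append] at hA hB
  rw [hA]
  have hj : PySem.Chars.join [] ((splitSimple [] command.toList).tail) =
      ((splitSimple [] command.toList).drop 1).flatten := by
    rw [List.drop_one]
    simp only [PySem.Chars.join, List.intercalate]
    exact flatten_intersperse_aux _
  rw [hj, hB.2, hB.1]
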